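-- pv_equiv track=rewrite | github.com/marcoboucas/questionAnswering | transformers_api/load_transformers.py | remove_hastags
-- ===== SOURCE A (Python) =====
-- def remove_hastags(tokens):
--     """Function that change the tokens to avoid #
--     and join the text
--     """
--     new_tokens = []
--     for token in tokens:
--         if token not in ['[CLS]', '[SEP]']:
--             if token[0:2] == "##":
--                 new_tokens[-1] += token[2:]
--             else:
--                 new_tokens.append(token)
--     return new_tokens
-- ===== SOURCE B (Python) =====
-- def remove_hastags(tokens):
--     """Two stages: filter out special tokens, then build the output group by
--     group: an index cursor finds the extent of each word's run of '##'
--     continuations and the whole run is joined into one output word."""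
--     filtered = [t for t in tokens if t not in ('[CLS]', '[SEP]')]
--     out = []
--     i = 0
--     n = len(filtered)
--     while i < n:
--         k = i + 1
--         while k < n and filtered[k].startswith('##'):
--             k += 1
--         out.append(filtered[i] + ''.join(p[2:] for p in filtered[i + 1:k]))
--         i = k
--     return out
-- ===== Notes on version B (the rewrite author's own statement) =====
-- stated objective: alternative
-- what changed: B first filters out '[CLS]'/'[SEP]', then builds the output group by group: a cursor scans the extent of each '##'-continuation run and joins the whole run into one word, instead of A's single left-to-right loop that mutates the last element of the output list.
-- crash fix: When the first non-special token starts with '##', A raises IndexError (new_tokens[-1] on an empty list) while B returns that token (with later continuations merged) as a word of its own. — e.g. on remove_hastags(["##ab"]): A raises IndexError, B returns ["##ab"]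
import Mathlib
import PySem

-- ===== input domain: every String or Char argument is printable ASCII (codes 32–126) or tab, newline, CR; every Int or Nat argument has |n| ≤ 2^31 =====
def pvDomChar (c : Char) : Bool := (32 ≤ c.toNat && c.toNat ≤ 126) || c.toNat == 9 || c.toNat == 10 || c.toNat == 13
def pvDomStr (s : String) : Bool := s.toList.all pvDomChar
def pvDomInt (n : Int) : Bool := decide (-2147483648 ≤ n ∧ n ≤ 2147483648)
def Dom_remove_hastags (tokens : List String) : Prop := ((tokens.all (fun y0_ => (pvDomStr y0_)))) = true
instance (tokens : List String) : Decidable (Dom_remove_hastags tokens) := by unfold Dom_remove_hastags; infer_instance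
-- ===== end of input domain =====

-- B filters out the special tokens and then builds the output by group recursion
-- (consume one word plus its whole run of '##' continuations per step), instead of
-- A's single loop mutating the last output element (alternative decomposition, same cost).

-- ===== PORT A =====
-- literal port of A; 'new_tokens[-1] += token[2:]' is dropLast ++ [last ++ token[2:]]
-- (Python raises IndexError on an empty new_tokens there; those inputs are outside Pre_)
def remove_hastags (tokens : List String) : List String :=
  tokens.foldl (fun new_tokens token =>
    if ¬ (token ∈ ["[CLS]", "[SEP]"]) then
      if PySem.Str.slice token (some 0) (some 2) == "##" then
        new_tokens.dropLast ++ [(new_tokens.getLast?.getD "") ++ PySem.Str.slice token (some 2) none]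
      else
        new_tokens ++ [token]
    else new_tokens) []

-- ===== PORT B =====
-- the 'while' scanning the run of '##' tokens is takeWhile/dropWhile; the join is a foldl
def remove_hastags_merge : List String → List String
  | [] => []
  | w :: rest =>
    let conts := rest.takeWhile (fun t => PySem.Str.startswith t "##")
    let word := conts.foldl (fun a t => a ++ PySem.Str.slice t (some 2) none) w
    word :: remove_hastags_merge (rest.dropWhile (fun t => PySem.Str.startswith t "##"))
termination_by ts => ts.length
decreasing_by
  have := List.length_dropWhile_le (fun t => PySem.Str.startswith t "##") rest
  simp only [List.length_cons]
  omega

def remove_hastags_alt (tokens : List String) : List String :=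
  remove_hastags_merge (tokens.filter (fun t => !(t == "[CLS]" || t == "[SEP]")))

-- ===== PRECONDITION & SPEC =====
-- Pre_ excludes exactly the inputs where A raises IndexError: a '##'-prefixed token
-- preceded only by special tokens (new_tokens[-1] on an empty list).
def Pre_remove_hastags (tokens : List String) : Prop :=
  ((tokens.filter (fun t => !(t == "[CLS]" || t == "[SEP]"))).head?.all
    (fun t => !PySem.Str.startswith t "##")) = true
instance (tokens : List String) : Decidable (Pre_remove_hastags tokens) := by
  unfold Pre_remove_hastags; infer_instance

def pvWitness_remove_hastags : List String := ["[CLS]", "hello", "##world", "ok", "[SEP]"]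

-- When the first non-special token starts with '##', A raises IndexError
-- (new_tokens[-1] on an empty list) while B returns that token, with later
-- continuations merged, as a word of its own.
def Raises_remove_hastags (tokens : List String) : Prop :=
  ((tokens.filter (fun t => !(t == "[CLS]" || t == "[SEP]"))).head?.any
    (fun t => PySem.Str.startswith t "##")) = true
instance (tokens : List String) : Decidable (Raises_remove_hastags tokens) := by
  unfold Raises_remove_hastags; infer_instance

def pvRaiseWitness_remove_hastags : List String := ["##ab"]
def pvRaiseWitnessOut_remove_hastags : List String := ["##ab"]

def Spec_remove_hastags (tokens : List String) (out : List String) : Prop := out = remove_hastags_alt tokens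
instance (tokens : List String) (out : List String) : Decidable (Spec_remove_hastags tokens out) := by unfold Spec_remove_hastags; infer_instance

-- ===== CLAIM (what is proved, stated in full; the proofs are below) =====
def Claim_equal_remove_hastags : Prop := ∀ (tokens : List String), Dom_remove_hastags tokens → Pre_remove_hastags tokens → Spec_remove_hastags tokens (remove_hastags tokens)

def Claim_raises_remove_hastags : Prop :=
  (∀ (tokens : List String), Dom_remove_hastags tokens → Raises_remove_hastags tokens → ¬ Pre_remove_hastags tokens) ∧
  (Dom_remove_hastags (pvRaiseWitness_remove_hastags) ∧ Raises_remove_hastags (pvRaiseWitness_remove_hastags) ∧ remove_hastags_alt (pvRaiseWitness_remove_hastags) = pvRaiseWitnessOut_remove_hastags)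

-- ===== LEMMAS AND PROOFS =====

lemma merge_nil : remove_hastags_merge [] = [] := by
  rw [remove_hastags_merge]

-- A's slice test agrees with B's startswith test
lemma slice_beq_eq_startswith (t : String) :
    (PySem.Str.slice t (some 0) (some 2) == "##") = PySem.Str.startswith t "##" := by
  have e : "##".toList = ['#','#'] := rfl
  rcases Bool.eq_false_or_eq_true (PySem.Str.startswith t "##") with h | h <;> rw [h]
  · rw [beq_iff_eq]
    have h' := h
    rw [PySem.Str.startswith_eq, PySem.Chars.startswith_iff, List.prefix_iff_eq_take] at h'
    apply String.ext
    rw [PySem.Str.toList_slice]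
    simp only [PySem.Chars.slice_eq_listSlice, PySem.List.slice_zero_start]
    simp [pysem]
    simp only [e, List.length_cons, List.length_nil] at h'
    exact h'.symm
  · rw [beq_eq_false_iff_ne]
    intro hc
    apply absurd h
    simp only [Bool.not_eq_false]
    rw [PySem.Str.startswith_eq, PySem.Chars.startswith_iff]
    have h2 : (PySem.Str.slice t (some 0) (some 2)).toList = "##".toList := by rw [hc]
    rw [PySem.Str.toList_slice] at h2
    simp only [PySem.Chars.slice_eq_listSlice, PySem.List.slice_zero_start] at h2
    simp [pysem] at h2
    rw [List.prefix_iff_eq_take]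
    simp only [e, List.length_cons, List.length_nil]
    exact h2.symm

lemma foldA_eq_filter (g : List String → String → List String) :
    ∀ (tokens : List String) (acc : List String),
      tokens.foldl (fun a t => if ¬ (t ∈ ["[CLS]", "[SEP]"]) then g a t else a) acc
        = (tokens.filter (fun t => !(t == "[CLS]" || t == "[SEP]"))).foldl g acc := by
  intro tokens
  induction tokens with
  | nil => intro acc; rfl
  | cons t ts ih =>
    intro acc
    rw [List.foldl_cons, List.filter_cons]
    by_cases h : t ∈ ["[CLS]", "[SEP]"]
    · have hb : (!(t == "[CLS]" || t == "[SEP]")) = false := by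
        simp only [List.mem_cons, List.not_mem_nil, or_false] at h
        rcases h with h | h <;> simp [h]
      rw [if_neg (not_not_intro h), hb]
      simp only [Bool.false_eq_true, if_false]
      exact ih acc
    · have hb : (!(t == "[CLS]" || t == "[SEP]")) = true := by
        simp only [List.mem_cons, List.not_mem_nil, or_false, not_or] at h
        simp [h.1, h.2]
      rw [if_pos h, hb]
      simp only [if_true]
      rw [List.foldl_cons]
      exact ih (g acc t)

-- merging a '##' continuation into the head word commutes with the group recursion
lemma merge_cons_hash (w t : String) (ts : List String)
    (h : PySem.Str.startswith t "##" = true) :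
    remove_hastags_merge (w :: t :: ts)
      = remove_hastags_merge ((w ++ PySem.Str.slice t (some 2) none) :: ts) := by
  rw [remove_hastags_merge, remove_hastags_merge]
  simp only [List.takeWhile_cons, List.dropWhile_cons, h, if_true, List.foldl_cons]

lemma merge_cons_word (w t : String) (ts : List String)
    (h : PySem.Str.startswith t "##" = false) :
    remove_hastags_merge (w :: t :: ts) = w :: remove_hastags_merge (t :: ts) := by
  rw [remove_hastags_merge]
  simp only [List.takeWhile_cons, List.dropWhile_cons, h, Bool.false_eq_true, if_false,
    List.foldl_nil]

-- A's loop over the filtered list, with at least one word already emitted,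
-- computes the group recursion on the remaining tokens
lemma merge_inv :
    ∀ (rest : List String) (q : List String) (w : String),
      rest.foldl (fun a t =>
        if PySem.Str.slice t (some 0) (some 2) == "##" then
          a.dropLast ++ [(a.getLast?.getD "") ++ PySem.Str.slice t (some 2) none]
        else a ++ [t]) (q ++ [w])
      = q ++ remove_hastags_merge (w :: rest) := by
  intro rest
  induction rest with
  | nil =>
    intro q w
    rw [remove_hastags_merge]
    simp [merge_nil]
  | cons t ts ih =>
    intro q w
    rw [List.foldl_cons, slice_beq_eq_startswith t]
    by_cases h : PySem.Str.startswith t "##" = true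
    · simp only [h, if_true, List.dropLast_concat, List.getLast?_concat, Option.getD_some]
      rw [ih q (w ++ PySem.Str.slice t (some 2) none), merge_cons_hash w t ts h]
    · have hf : PySem.Str.startswith t "##" = false := by simpa using h
      simp only [hf, Bool.false_eq_true, if_false]
      rw [show q ++ [w] ++ [t] = (q ++ [w]) ++ [t] from rfl, ih (q ++ [w]) t,
        merge_cons_word w t ts hf]
      simp [List.append_assoc]

-- ===== VERDICT (by name: the statement is the Claim_ definition above) =====
theorem remove_hastags_spec : Claim_equal_remove_hastags := by
  intro tokens _hd hpre
  unfold Spec_remove_hastags remove_hastags remove_hastags_alt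
  rw [foldA_eq_filter]
  cases hcase : tokens.filter (fun t => !(t == "[CLS]" || t == "[SEP]")) with
  | nil => rw [List.foldl_nil, merge_nil]
  | cons w0 rest =>
    unfold Pre_remove_hastags at hpre
    rw [hcase] at hpre
    simp only [List.head?_cons, Option.all_some, Bool.not_eq_true'] at hpre
    rw [List.foldl_cons, slice_beq_eq_startswith w0]
    simp only [hpre, Bool.false_eq_true, if_false]
    have := merge_inv rest [] w0
    simp only [List.nil_append] at this ⊢
    exact this

def remove_hastags_raises : Claim_raises_remove_hastags := by
  unfold Claim_raises_remove_hastags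
  refine ⟨?_, by decide, by decide, ?_⟩
  case _ =>
    intro tokens _hd hr hp
    unfold Raises_remove_hastags at hr
    unfold Pre_remove_hastags at hp
    cases hcase : (tokens.filter (fun t => !(t == "[CLS]" || t == "[SEP]"))).head? with
    | none => rw [hcase] at hr; simp at hr
    | some t =>
      rw [hcase] at hr hp
      simp only [Option.any_some] at hr
      simp only [Option.all_some, Bool.not_eq_true'] at hp
      rw [PySem.Str.startswith_eq, show "##".toList = ['#','#'] from rfl] at hr
      simp [hr] at hp
  case _ =>
    unfold remove_hastags_alt pvRaiseWitness_remove_hastags pvRaiseWitnessOut_remove_hastags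
    rw [show List.filter (fun t => !(t == "[CLS]" || t == "[SEP]")) ["##ab"] = ["##ab"] from by decide]
    rw [remove_hastags_merge]
    simp [merge_nil]
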